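-- pv_equiv track=rewrite | github.com/back2zion/asan | ai_services/conversation_memory/graph/nodes/query_modifier.py | _determine_modification_type
-- ===== SOURCE A (Python) =====
-- def _determine_modification_type(conditions: list[str]) -> str:
--     """수정 유형을 판단합니다."""
--     if not conditions:
--         return "none"
--
--     if any("subquery" in c.lower() or "prev_result" in c.lower() for c in conditions):
--         return "subquery_filter"
--
--     if any("person_id IN" in c for c in conditions):
--         return "id_filter"
--
--     return "condition_filter"
-- ===== SOURCE B (Python) =====
-- def _rank(c: str) -> int:
--     """Priority rank of one condition: 0 = subquery-like, 1 = person_id IN, 2 = other."""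
--     lc = c.lower()
--     if "subquery" in lc or "prev_result" in lc:
--         return 0
--     if "person_id IN" in c:
--         return 1
--     return 2
--
--
-- def _determine_modification_type(conditions: list[str]) -> str:
--     """Rank every condition individually, reduce with min, index into a label table."""
--     if not conditions:
--         return "none"
--     labels = ["subquery_filter", "id_filter", "condition_filter"]
--     return labels[min(_rank(c) for c in conditions)]
-- ===== Notes on version B (the rewrite author's own statement) =====
-- stated objective: alternative
-- what changed: Replaces A's three staged whole-list any() scans with a rank-and-reduce scheme: each condition is mapped to a numeric priority (0/1/2), the list is reduced with min, and the result indexes a label table.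
import Mathlib
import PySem

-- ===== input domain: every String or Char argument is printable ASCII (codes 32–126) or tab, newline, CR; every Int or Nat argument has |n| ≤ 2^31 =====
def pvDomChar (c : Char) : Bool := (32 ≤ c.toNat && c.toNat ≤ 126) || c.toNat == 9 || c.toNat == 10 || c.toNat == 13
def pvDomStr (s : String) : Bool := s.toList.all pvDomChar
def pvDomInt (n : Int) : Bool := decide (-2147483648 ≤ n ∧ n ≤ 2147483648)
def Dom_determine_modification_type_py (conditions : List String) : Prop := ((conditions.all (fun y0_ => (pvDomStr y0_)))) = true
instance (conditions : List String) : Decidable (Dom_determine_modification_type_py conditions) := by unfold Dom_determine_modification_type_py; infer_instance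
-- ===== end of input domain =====

-- B classifies via a rank-and-reduce scheme (per-condition numeric priority, min-reduction, label table) instead of A's three staged any() scans (alternative decomposition, same cost).


-- ===== PORT A =====
def determine_modification_type_py (conditions : List String) : String :=
  if conditions = [] then "none"
  else if conditions.any (fun c =>
      PySem.Str.isIn "subquery" (PySem.Str.lower c) || PySem.Str.isIn "prev_result" (PySem.Str.lower c)) then
    "subquery_filter"
  else if conditions.any (fun c => PySem.Str.isIn "person_id IN" c) then
    "id_filter"
  else
    "condition_filter"

-- ===== PORT B =====
-- B helper: priority rank of one condition (0 = subquery-like, 1 = person_id IN, 2 = other).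
def pvRank (c : String) : Nat :=
  let lc := PySem.Str.lower c
  if PySem.Str.isIn "subquery" lc || PySem.Str.isIn "prev_result" lc then 0
  else if PySem.Str.isIn "person_id IN" c then 1
  else 2

-- B: map each condition to its rank, reduce with min, index the label table.
def determine_modification_type_py_alt (conditions : List String) : String :=
  if conditions = [] then "none"
  else
    let labels := ["subquery_filter", "id_filter", "condition_filter"]
    labels.getD ((PySem.List.min? (conditions.map pvRank) (fun x => x)).getD 2) "condition_filter"

-- ===== PRECONDITION & SPEC =====
def Spec_determine_modification_type_py (conditions : List String) (out : String) : Prop := out = determine_modification_type_py_alt conditions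
instance (conditions : List String) (out : String) : Decidable (Spec_determine_modification_type_py conditions out) := by unfold Spec_determine_modification_type_py; infer_instance

-- ===== CLAIM (what is proved, stated in full; the proofs are below) =====
def Claim_equal_determine_modification_type_py : Prop := ∀ (conditions : List String), Dom_determine_modification_type_py conditions → Spec_determine_modification_type_py conditions (determine_modification_type_py conditions)

-- ===== LEMMAS AND PROOFS =====
lemma pvRank_le (c : String) : pvRank c ≤ 2 := by
  unfold pvRank; dsimp only; split_ifs <;> omega

lemma foldl_min_rank (l : List String) (a : Nat) (ha : a ≤ 2) :
    (l.map pvRank).foldl min a =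
      min a (if l.any (fun c => PySem.Str.isIn "subquery" (PySem.Str.lower c) || PySem.Str.isIn "prev_result" (PySem.Str.lower c)) then 0
             else if l.any (fun c => PySem.Str.isIn "person_id IN" c) then 1 else 2) := by
  induction l generalizing a with
  | nil => simp; omega
  | cons c t ih =>
    have hc := pvRank_le c
    simp only [List.map_cons, List.foldl_cons, List.any_cons]
    rw [ih (min a (pvRank c)) (by omega)]
    unfold pvRank
    dsimp only
    by_cases h1 : (PySem.Str.isIn "subquery" (PySem.Str.lower c) || PySem.Str.isIn "prev_result" (PySem.Str.lower c)) = true <;>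
      by_cases h2 : (PySem.Str.isIn "person_id IN" c) = true <;>
        simp only [h1, h2, Bool.true_or, Bool.false_or, if_true, Bool.not_eq_true] at * <;>
          split_ifs <;> simp_all

-- ===== VERDICT (by name: the statement is the Claim_ definition above) =====
theorem determine_modification_type_py_spec : Claim_equal_determine_modification_type_py := by
  intro conditions _
  unfold Spec_determine_modification_type_py determine_modification_type_py determine_modification_type_py_alt
  match conditions with
  | [] => simp
  | c :: t =>
    simp only [if_neg (List.cons_ne_nil c t), List.map_cons]
    rw [PySem.List.min?_id_cons]
    have h := foldl_min_rank t (pvRank c) (pvRank_le c)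
    rw [h]
    unfold pvRank
    simp only [List.any_cons]
    by_cases h1 : (PySem.Str.isIn "subquery" (PySem.Str.lower c) || PySem.Str.isIn "prev_result" (PySem.Str.lower c)) = true <;>
      by_cases h2 : (PySem.Str.isIn "person_id IN" c) = true <;>
        simp [h1, h2] <;> split_ifs <;> simp_all
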